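-- pv_equiv track=rewrite | github.com/circuitdao/circuit-cli | circuit_cli/json_formatter.py | _sort_keys
-- ===== SOURCE A (Python) =====
-- from typing import Any, Dict, List, Union
--
-- def _sort_keys(keys: List[str]) -> List[str]:
--     """Sort keys to put most important ones first."""
--     priority_keys = ["name", "id", "status", "balance", "amount", "address"]
--     constraint_keys = ["threshold_amount_to_propose", "veto_interval", "implementation_delay", "max_delta"]
--
--     sorted_keys = []
--     remaining_keys = list(keys)
--
--     if all(key in keys for key in constraint_keys):
--         # we are dealing with a statute
--         sorted_keys=[]
--         if "proposal_times" in keys: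
--             sorted_keys.append("proposal_times")
--         if "statute_index" in keys:
--             sorted_keys.append("statute_index")
--         if "statute_name" in keys:
--             sorted_keys.append("statute_name")
--         if "value" in keys:
--             sorted_keys.append("value")
--         sorted_keys.extend(constraint_keys)
--         return sorted_keys
--
--     # Add priority keys first
--     for priority_key in priority_keys:
--         for key in keys:
--             if priority_key in key.lower() and key in remaining_keys:
--                 sorted_keys.append(key)
--                 remaining_keys.remove(key)
--
--     # Add remaining keys alphabetically
--     sorted_keys.extend(sorted(remaining_keys))
--     return sorted_keys
-- ===== SOURCE B (Python) =====
-- def _sort_keys(keys):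
--     """Sort keys to put most important ones first."""
--     priority_keys = ["name", "id", "status", "balance", "amount", "address"]
--     constraint_keys = ["threshold_amount_to_propose", "veto_interval", "implementation_delay", "max_delta"]
--
--     if all(key in keys for key in constraint_keys):
--         # we are dealing with a statute
--         head = [k for k in ["proposal_times", "statute_index", "statute_name", "value"] if k in keys]
--         return head + constraint_keys
--
--     def rank(key):
--         low = key.lower()
--         return next((i for i, p in enumerate(priority_keys) if p in low), None)
--
--     ranked = [k for k in keys if rank(k) is not None]
--     ranked.sort(key=rank)  # stable: original order preserved within one rank
--     unranked = sorted(k for k in keys if rank(k) is None)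
--     return ranked + unranked
-- ===== Notes on version B (the rewrite author's own statement) =====
-- stated objective: simpler
-- what changed: The nested priority-key/keys scan with list.remove is replaced by computing a first-match priority rank per key and doing one stable sort of the ranked keys by rank (plus sorted() on the unranked rest); the statute branch's fixed ordering is kept.
import Mathlib
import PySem

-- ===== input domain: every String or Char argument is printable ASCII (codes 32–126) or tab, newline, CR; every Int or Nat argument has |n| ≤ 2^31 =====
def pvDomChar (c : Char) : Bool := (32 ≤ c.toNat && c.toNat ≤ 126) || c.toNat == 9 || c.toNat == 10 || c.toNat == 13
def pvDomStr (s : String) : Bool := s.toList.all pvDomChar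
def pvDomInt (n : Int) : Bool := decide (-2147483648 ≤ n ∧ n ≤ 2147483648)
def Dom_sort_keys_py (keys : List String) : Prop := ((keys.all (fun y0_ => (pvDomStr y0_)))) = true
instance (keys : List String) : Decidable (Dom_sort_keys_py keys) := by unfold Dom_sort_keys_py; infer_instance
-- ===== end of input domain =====

-- B computes a first-match priority rank per key and does one stable sort by it instead of A's
-- nested priority/keys scans with list.remove; same return value, objective: simpler.

-- ===== PORT A =====
def sort_keys_py (keys : List String) : List String :=
  let priority_keys : List String := ["name", "id", "status", "balance", "amount", "address"]
  let constraint_keys : List String :=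
    ["threshold_amount_to_propose", "veto_interval", "implementation_delay", "max_delta"]
  if constraint_keys.all (fun key => keys.contains key) then
    ((((if keys.contains "proposal_times" then ["proposal_times"] else []) ++
       (if keys.contains "statute_index" then ["statute_index"] else [])) ++
      (if keys.contains "statute_name" then ["statute_name"] else [])) ++
      (if keys.contains "value" then ["value"] else [])) ++ constraint_keys
  else
    let st := priority_keys.foldl
      (fun (st : List String × List String) priority_key =>
        keys.foldl
          (fun (st : List String × List String) key =>
            if PySem.Str.isIn priority_key (PySem.Str.lower key) && st.2.contains key then
              -- remaining_keys.remove(key): membership is guarded, so remove = erase of the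
              -- first occurrence (PySem.List.remove?_eq_some_erase)
              (st.1 ++ [key], st.2.erase key)
            else st) st) ([], keys)
    st.1 ++ PySem.List.sorted st.2 (fun x => x)

-- ===== PORT B =====
-- rank(key): index of the first priority key that is a substring of key.lower(), else None
def pvRankB (key : String) : Option Nat :=
  (["name", "id", "status", "balance", "amount", "address"] : List String).findIdx?
    (fun p => PySem.Str.isIn p (PySem.Str.lower key))

def sort_keys_py_alt (keys : List String) : List String :=
  let constraint_keys : List String :=
    ["threshold_amount_to_propose", "veto_interval", "implementation_delay", "max_delta"]
  if constraint_keys.all (fun key => keys.contains key) then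
    ((["proposal_times", "statute_index", "statute_name", "value"] : List String).filter
      (fun k => keys.contains k)) ++ constraint_keys
  else
    let ranked := keys.filter (fun k => (pvRankB k).isSome)
    let unranked := keys.filter (fun k => (pvRankB k).isNone)
    -- ranked.sort(key=rank): every ranked key has a rank, so .getD 0 is Source B's int key exactly
    PySem.List.sorted ranked (fun k => (pvRankB k).getD 0) ++ PySem.List.sorted unranked (fun x => x)

-- ===== PRECONDITION & SPEC =====
def Spec_sort_keys_py (keys : List String) (out : List String) : Prop := out = sort_keys_py_alt keys
instance (keys : List String) (out : List String) : Decidable (Spec_sort_keys_py keys out) := by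
  unfold Spec_sort_keys_py; infer_instance

-- ===== CLAIM (what is proved, stated in full; the proofs are below) =====
def Claim_equal_sort_keys_py : Prop :=
  ∀ (keys : List String), Dom_sort_keys_py keys → Spec_sort_keys_py keys (sort_keys_py keys)

-- ===== LEMMAS AND PROOFS =====

-- the bucket of rank i, and "rank is ≥ i or none"
def pvF (i : Nat) (keys : List String) : List String :=
  keys.filter (fun k => pvRankB k == some i)
def pvGe (i : Nat) (k : String) : Bool :=
  match pvRankB k with | none => true | some j => decide (i ≤ j)
def pvEraseFold (m r : List String) : List String := m.foldl (fun r k => r.erase k) r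

lemma pvRankB_eq (k : String) : pvRankB k =
    (if PySem.Str.isIn "name" (PySem.Str.lower k) then some 0
     else if PySem.Str.isIn "id" (PySem.Str.lower k) then some 1
     else if PySem.Str.isIn "status" (PySem.Str.lower k) then some 2
     else if PySem.Str.isIn "balance" (PySem.Str.lower k) then some 3
     else if PySem.Str.isIn "amount" (PySem.Str.lower k) then some 4
     else if PySem.Str.isIn "address" (PySem.Str.lower k) then some 5
     else none) := by
  simp only [pvRankB, List.findIdx?_cons, List.findIdx?_nil]
  split_ifs <;> simp_all

lemma pvRank_lt (k : String) (j : Nat) (h : pvRankB k = some j) : j < 6 := by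
  rw [pvRankB_eq] at h; split_ifs at h <;> simp_all <;> omega

-- generic stage lemma: one pass of A's inner loop, for a match test m agreeing with rank i
lemma pvStage (m : String → Bool) (i : Nat)
    (hm1 : ∀ k, m k = true → ∃ j, pvRankB k = some j ∧ j ≤ i)
    (hm2 : ∀ k, pvRankB k = some i → m k = true) :
    ∀ (l s r : List String),
      (∀ k ∈ r, ∀ j, pvRankB k = some j → i ≤ j) →
      (∀ k, pvRankB k = some i → l.count k ≤ r.count k) →
      l.foldl (fun (st : List String × List String) key =>
          if m key && st.2.contains key then (st.1 ++ [key], st.2.erase key) else st) (s, r)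
        = (s ++ l.filter (fun k => pvRankB k == some i),
           pvEraseFold (l.filter (fun k => pvRankB k == some i)) r) := by
  intro l
  induction l with
  | nil => intro s r _ _; simp [pvEraseFold]
  | cons x l ih =>
    intro s r hr hc
    by_cases hx : pvRankB x = some i
    · have hmx : m x = true := hm2 x hx
      have hxr : x ∈ r := by
        have h1 : 0 < (x :: l).count x := by simp [List.count_cons_self]
        have := hc x hx
        exact List.count_pos_iff.mp (by omega)
      have hcont : r.contains x = true := List.contains_iff_mem.mpr hxr
      simp only [List.foldl_cons, hmx, hcont, Bool.and_self, if_true]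
      rw [ih (s ++ [x]) (r.erase x)
        (fun k hk j hj => hr k (List.mem_of_mem_erase hk) j hj)
        (fun k hk => by
          by_cases hkx : k = x
          · subst hkx
            have h1 := hc k hk
            have h2 : (k :: l).count k = l.count k + 1 := List.count_cons_self ..
            rw [List.count_erase_self]; omega
          · rw [List.count_erase_of_ne hkx]
            have := hc k hk
            rw [List.count_cons_of_ne (Ne.symm hkx)] at this; exact this)]
      simp [hx, pvEraseFold]
    · have hcond : (m x && r.contains x) = false := by
        rcases Bool.eq_false_or_eq_true (m x) with h | h
        swap
        · simp [h]
        · rcases hm1 x h with ⟨j, hj, hji⟩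
          have hxr : x ∉ r := by
            intro hmem
            have := hr x hmem j hj
            have : j = i := le_antisymm hji this
            exact hx (this ▸ hj)
          simp [h, hxr]
      simp only [List.foldl_cons, hcond, if_false, Bool.false_eq_true]
      rw [ih s r hr (fun k hk => by
        have := hc k hk
        calc l.count k ≤ (x :: l).count k := by
              rcases eq_or_ne k x with h | h
              · simp [h, List.count_cons_self]
              · rw [List.count_cons_of_ne (Ne.symm h)]
            _ ≤ r.count k := this)]
      have : (pvRankB x == some i) = false := by simp [hx]
      simp [this]

lemma pvEraseFold_cons_of_ne (m : List String) (x : String) (hx : ∀ e ∈ m, e ≠ x) :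
    ∀ B, pvEraseFold m (x :: B) = x :: pvEraseFold m B := by
  induction m with
  | nil => intro B; rfl
  | cons e m ih =>
    intro B
    have he : x ≠ e := fun h => (hx e (by simp)) h.symm
    show pvEraseFold m ((x :: B).erase e) = x :: pvEraseFold m (B.erase e)
    rw [List.erase_cons_tail (by simp [he])]
    exact ih (fun e' h' => hx e' (by simp [h'])) _

lemma pvEraseEach_filter (p q : String → Bool) (hd : ∀ k, ¬(p k = true ∧ q k = true)) :
    ∀ l : List String,
      pvEraseFold (l.filter p) (l.filter (fun k => p k || q k)) = l.filter q := by
  intro l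
  induction l with
  | nil => rfl
  | cons x l ih =>
    by_cases hp : p x = true
    · have hq : q x = false := by
        cases h : q x
        · rfl
        · exact absurd ⟨hp, h⟩ (hd x)
      simp only [List.filter_cons, hp, hq, Bool.true_or, if_true]
      show pvEraseFold (l.filter p) ((x :: l.filter (fun k => p k || q k)).erase x) = _
      rw [List.erase_cons_head]
      simp [ih]
    · have hp' : p x = false := by simpa using hp
      by_cases hq : q x = true
      · simp only [List.filter_cons, hp', hq, Bool.false_or, if_true, if_false,
          Bool.false_eq_true]
        rw [pvEraseFold_cons_of_ne]
        · rw [ih]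
        · intro e he heq
          have := List.of_mem_filter he
          rw [heq] at this; simp [hp'] at this
      · have hq' : q x = false := by simpa using hq
        simp only [List.filter_cons, hp', hq', Bool.false_or, if_false, Bool.false_eq_true]
        exact ih

lemma pvStep (i : Nat) (m : String → Bool)
    (hm1 : ∀ k, m k = true → ∃ j, pvRankB k = some j ∧ j ≤ i)
    (hm2 : ∀ k, pvRankB k = some i → m k = true)
    (keys S : List String) :
    keys.foldl (fun (st : List String × List String) key =>
        if m key && st.2.contains key then (st.1 ++ [key], st.2.erase key) else st)
      (S, keys.filter (pvGe i))
      = (S ++ pvF i keys, keys.filter (pvGe (i + 1))) := by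
  have h1 : ∀ k ∈ keys.filter (pvGe i), ∀ j, pvRankB k = some j → i ≤ j := by
    intro k hk j hj
    have := List.of_mem_filter hk
    simp only [pvGe, hj] at this
    exact of_decide_eq_true this
  have h2 : ∀ k, pvRankB k = some i → keys.count k ≤ (keys.filter (pvGe i)).count k := by
    intro k hk
    rw [List.count_filter (by simp [pvGe, hk])]
  rw [pvStage m i hm1 hm2 keys S (keys.filter (pvGe i)) h1 h2]
  refine Prod.ext rfl ?_
  show pvEraseFold (keys.filter (fun k => pvRankB k == some i)) (keys.filter (pvGe i))
      = keys.filter (pvGe (i + 1))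
  have hfc : keys.filter (pvGe i)
      = keys.filter (fun k => (pvRankB k == some i) || pvGe (i + 1) k) := by
    apply List.filter_congr
    intro k _
    cases hrk : pvRankB k with
    | none => simp [pvGe, hrk]
    | some j =>
      simp only [pvGe, hrk]
      by_cases h : j = i
      · simp [h]
      · have hiff : (i ≤ j) ↔ (i + 1 ≤ j) := by omega
        simp [h, hiff]
  rw [hfc]
  apply pvEraseEach_filter
  intro k ⟨hpk, hqk⟩
  have hk : pvRankB k = some i := by simpa using hpk
  simp [pvGe, hk] at hqk

lemma pvFlatMap_congr {α β : Type} (L : List α) (f g : α → List β) (h : ∀ j ∈ L, f j = g j) :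
    L.flatMap f = L.flatMap g := by
  induction L with
  | nil => rfl
  | cons a L ih =>
    simp only [List.flatMap_cons]
    rw [h a (by simp), ih (fun j hj => h j (by simp [hj]))]

-- stable bucket characterisation of sorted with a Nat key
lemma pvInsertBy_append_left (before : String → String → Bool) (x : String) :
    ∀ A B, (∀ y ∈ A, before x y = false) →
      PySem.List.insertBy before x (A ++ B) = A ++ PySem.List.insertBy before x B := by
  intro A
  induction A with
  | nil => intro B _; rfl
  | cons a A ih =>
    intro B h
    have ha : before x a = false := h a (by simp)
    simp only [List.cons_append, PySem.List.insertBy, ha]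
    simp only [Bool.false_eq_true, if_false]
    rw [ih B (fun y hy => h y (by simp [hy]))]

lemma pvInsertBy_all_before (before : String → String → Bool) (x : String)
    (B : List String) (h : ∀ y ∈ B, before x y = true) :
    PySem.List.insertBy before x B = x :: B := by
  cases B with
  | nil => rfl
  | cons b B => simp [PySem.List.insertBy, h b (by simp)]

lemma pvSorted_buckets (key : String → Nat) (n : Nat) :
    ∀ l : List String, (∀ k ∈ l, key k < n) →
      PySem.List.sorted l key = (List.range n).flatMap (fun j => l.filter (fun k => key k == j)) := by
  intro l
  induction l using List.reverseRecOn with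
  | nil =>
    intro _
    rw [PySem.List.sorted_eq_foldl_insertBy]
    simp
  | append_singleton l x ih =>
    intro h
    have hx : key x < n := h x (by simp)
    have hstep : PySem.List.sorted (l ++ [x]) key
        = PySem.List.insertBy (fun a b => decide (key a < key b)) x (PySem.List.sorted l key) := by
      rw [PySem.List.sorted_eq_foldl_insertBy, PySem.List.sorted_eq_foldl_insertBy,
        List.foldl_append]
      rfl
    obtain ⟨d, hd⟩ : ∃ d : Nat, n = (key x + 1) + d := ⟨n - (key x + 1), by omega⟩
    have hrange : List.range n
        = List.range (key x + 1) ++ (List.range d).map (fun t => (key x + 1) + t) := by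
      rw [hd, List.range_add]
    have hA : ∀ y ∈ (List.range (key x + 1)).flatMap (fun j => l.filter (fun k => key k == j)),
        (fun a b => decide (key a < key b)) x y = false := by
      intro y hy
      rcases List.mem_flatMap.mp hy with ⟨j, hj, hyf⟩
      have hj' : j < key x + 1 := List.mem_range.mp hj
      have hky : key y = j := by simpa using List.of_mem_filter hyf
      simp only [decide_eq_false_iff_not]
      omega
    have hB : ∀ y ∈ ((List.range d).map (fun t => (key x + 1) + t)).flatMap
        (fun j => l.filter (fun k => key k == j)),
        (fun a b => decide (key a < key b)) x y = true := by
      intro y hy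
      rcases List.mem_flatMap.mp hy with ⟨j, hj, hyf⟩
      rcases List.mem_map.mp hj with ⟨t, _, ht⟩
      have hky : key y = j := by simpa using List.of_mem_filter hyf
      simp only [decide_eq_true_eq]
      omega
    rw [hstep, ih (fun k hk => h k (by simp [hk])), hrange]
    rw [List.flatMap_append, List.flatMap_append,
      pvInsertBy_append_left _ x _ _ hA, pvInsertBy_all_before _ x _ hB]
    have hf' : ∀ j, (l ++ [x]).filter (fun k => key k == j)
        = l.filter (fun k => key k == j) ++ if key x == j then [x] else [] := by
      intro j
      rw [List.filter_append]
      cases hxy : (key x == j) <;> simp [List.filter, hxy]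
    have hgt : ((List.range d).map (fun t => (key x + 1) + t)).flatMap
        (fun j => (l ++ [x]).filter (fun k => key k == j))
        = ((List.range d).map (fun t => (key x + 1) + t)).flatMap
        (fun j => l.filter (fun k => key k == j)) := by
      apply pvFlatMap_congr
      intro j hj
      rcases List.mem_map.mp hj with ⟨t, _, ht⟩
      rw [hf' j]
      have : (key x == j) = false := by simp; omega
      simp [this]
    have hle : (List.range (key x + 1)).flatMap (fun j => (l ++ [x]).filter (fun k => key k == j))
        = (List.range (key x + 1)).flatMap (fun j => l.filter (fun k => key k == j)) ++ [x] := by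
      rw [List.range_succ, List.flatMap_append, List.flatMap_append]
      have h1 : (List.range (key x)).flatMap (fun j => (l ++ [x]).filter (fun k => key k == j))
          = (List.range (key x)).flatMap (fun j => l.filter (fun k => key k == j)) := by
        apply pvFlatMap_congr
        intro j hj
        have hj' : j < key x := List.mem_range.mp hj
        rw [hf' j]
        have : (key x == j) = false := by simp; omega
        simp [this]
      rw [h1]
      have h2 : ([key x] : List Nat).flatMap (fun j => (l ++ [x]).filter (fun k => key k == j))
          = ([key x] : List Nat).flatMap (fun j => l.filter (fun k => key k == j)) ++ [x] := by
        simp [List.flatMap]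
      rw [h2, List.append_assoc]
    rw [hgt, hle]
    simp

-- first-match facts per priority index, feeding pvStep
lemma pvHm1 (i : Nat) (hi : i < 6) (k : String)
    (h : PySem.Str.isIn (["name", "id", "status", "balance", "amount", "address"].getD i "")
      (PySem.Str.lower k) = true) : ∃ j, pvRankB k = some j ∧ j ≤ i := by
  rw [pvRankB_eq]
  interval_cases i <;> simp at h <;> split_ifs <;> simp_all

lemma pvHm2 (i : Nat) (hi : i < 6) (k : String) (h : pvRankB k = some i) :
    PySem.Str.isIn (["name", "id", "status", "balance", "amount", "address"].getD i "")
      (PySem.Str.lower k) = true := by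
  rw [pvRankB_eq] at h
  interval_cases i <;> simp <;> split_ifs at h <;> simp_all

lemma pvFilterGe0 (keys : List String) : keys.filter (pvGe 0) = keys :=
  List.filter_eq_self.mpr (fun k _ => by unfold pvGe; cases pvRankB k <;> simp)

-- ===== VERDICT (by name: the statement is the Claim_ definition above) =====
theorem sort_keys_py_spec : Claim_equal_sort_keys_py := by
  intro keys _
  show sort_keys_py keys = sort_keys_py_alt keys
  unfold sort_keys_py sort_keys_py_alt
  simp only []
  by_cases hc : (["threshold_amount_to_propose", "veto_interval", "implementation_delay",
      "max_delta"] : List String).all (fun key => keys.contains key) = true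
  case pos =>
    rw [if_pos hc, if_pos hc]
    -- statute branch: A's if-chain = B's filter over the literal 4-list
    by_cases h1 : "proposal_times" ∈ keys <;>
      by_cases h2 : "statute_index" ∈ keys <;>
        by_cases h3 : "statute_name" ∈ keys <;>
          by_cases h4 : "value" ∈ keys <;>
            simp [List.filter, h1, h2, h3, h4]
  case neg =>
    rw [if_neg hc, if_neg hc]
    -- general branch
    simp only [List.foldl_cons, List.foldl_nil]
    have s0 := pvStep 0 (fun key => PySem.Str.isIn "name" (PySem.Str.lower key))
      (fun k h => pvHm1 0 (by omega) k (by simpa using h))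
      (fun k h => by simpa using pvHm2 0 (by omega) k h) keys []
    have s1 := pvStep 1 (fun key => PySem.Str.isIn "id" (PySem.Str.lower key))
      (fun k h => pvHm1 1 (by omega) k (by simpa using h))
      (fun k h => by simpa using pvHm2 1 (by omega) k h) keys ([] ++ pvF 0 keys)
    have s2 := pvStep 2 (fun key => PySem.Str.isIn "status" (PySem.Str.lower key))
      (fun k h => pvHm1 2 (by omega) k (by simpa using h))
      (fun k h => by simpa using pvHm2 2 (by omega) k h) keys ([] ++ pvF 0 keys ++ pvF 1 keys)
    have s3 := pvStep 3 (fun key => PySem.Str.isIn "balance" (PySem.Str.lower key))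
      (fun k h => pvHm1 3 (by omega) k (by simpa using h))
      (fun k h => by simpa using pvHm2 3 (by omega) k h) keys
      ([] ++ pvF 0 keys ++ pvF 1 keys ++ pvF 2 keys)
    have s4 := pvStep 4 (fun key => PySem.Str.isIn "amount" (PySem.Str.lower key))
      (fun k h => pvHm1 4 (by omega) k (by simpa using h))
      (fun k h => by simpa using pvHm2 4 (by omega) k h) keys
      ([] ++ pvF 0 keys ++ pvF 1 keys ++ pvF 2 keys ++ pvF 3 keys)
    have s5 := pvStep 5 (fun key => PySem.Str.isIn "address" (PySem.Str.lower key))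
      (fun k h => pvHm1 5 (by omega) k (by simpa using h))
      (fun k h => by simpa using pvHm2 5 (by omega) k h) keys
      ([] ++ pvF 0 keys ++ pvF 1 keys ++ pvF 2 keys ++ pvF 3 keys ++ pvF 4 keys)
    rw [pvFilterGe0 keys] at s0
    rw [s0, s1, s2, s3, s4, s5]
    -- B's ranked sort is the rank buckets, which are A's appended stages
    have hbound : ∀ k ∈ keys.filter (fun k => (pvRankB k).isSome),
        (fun k => (pvRankB k).getD 0) k < 6 := by
      intro k hk
      have := List.of_mem_filter hk
      cases h : pvRankB k with
      | none => simp [h] at this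
      | some j => have := pvRank_lt k j h; simpa [h]
    rw [pvSorted_buckets (fun k => (pvRankB k).getD 0) 6 _ hbound]
    have hbucket : ∀ j, (keys.filter (fun k => (pvRankB k).isSome)).filter
        (fun k => (pvRankB k).getD 0 == j) = pvF j keys := by
      intro j
      rw [List.filter_filter]
      apply List.filter_congr
      intro k _
      cases pvRankB k <;> simp
    have hrest : keys.filter (pvGe 6) = keys.filter (fun k => (pvRankB k).isNone) := by
      apply List.filter_congr
      intro k _
      cases h : pvRankB k with
      | none => simp [pvGe, h]
      | some j =>
        have := pvRank_lt k j h
        simp [pvGe, h]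
        omega
    rw [hrest]
    have hrange6 : (List.range 6) = [0, 1, 2, 3, 4, 5] := rfl
    rw [hrange6]
    simp only [List.flatMap_cons, List.flatMap_nil, hbucket, List.append_nil]
    simp [List.append_assoc]
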